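-- pv_equiv track=rewrite | github.com/arunmenon/Engram | src/context_graph/domain/entity_resolution.py | compute_transitive_closure
-- ===== SOURCE A (Python) =====
-- class _UnionFind:
--     """Disjoint-set / union-find data structure for entity clustering."""
--
--     def __init__(self) -> None:
--         self._parent: dict[str, str] = {}
--         self._rank: dict[str, int] = {}
--
--     def find(self, x: str) -> str:
--         """Find root with path compression."""
--         if x not in self._parent:
--             self._parent[x] = x
--             self._rank[x] = 0
--         while self._parent[x] != x:
--             self._parent[x] = self._parent[self._parent[x]]  # path halving
--             x = self._parent[x]
--         return x
--
--     def union(self, a: str, b: str) -> None: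
--         """Union by rank."""
--         root_a = self.find(a)
--         root_b = self.find(b)
--         if root_a == root_b:
--             return
--         if self._rank[root_a] < self._rank[root_b]:
--             root_a, root_b = root_b, root_a
--         self._parent[root_b] = root_a
--         if self._rank[root_a] == self._rank[root_b]:
--             self._rank[root_a] += 1
--
-- def compute_transitive_closure(
--     edges: list[tuple[str, str]],
--     mention_counts: dict[str, int] | None = None,
-- ) -> dict[str, list[str]]:
--     """Compute connected-component clusters from pairwise SAME_AS edges.
--
--     Uses Union-Find to group transitively connected entities into clusters.
--     The canonical entity for each cluster is the one with the highest
--     ``mention_count`` (ties broken alphabetically).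
--
--     Parameters
--     ----------
--     edges:
--         List of ``(entity_id_a, entity_id_b)`` SAME_AS pairs.
--     mention_counts:
--         Optional mapping of ``entity_id -> mention_count``.  When ``None``,
--         the canonical is chosen alphabetically.
--
--     Returns
--     -------
--     dict mapping ``canonical_id`` to the full list of cluster member IDs
--     (including the canonical itself).  Singleton entities (those appearing
--     in ``edges`` with no partner beyond themselves) are included if they
--     appear in the edge list.
--     """
--     if not edges:
--         return {}
--
--     counts = mention_counts or {}
--     uf = _UnionFind()
--
--     for a, b in edges:
--         if a == b:
--             # Self-edges are no-ops but ensure the node exists in UF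
--             uf.find(a)
--             continue
--         uf.union(a, b)
--
--     # Gather clusters keyed by root
--     clusters: dict[str, list[str]] = {}
--     seen: set[str] = set()
--     for a, b in edges:
--         for node in (a, b):
--             if node not in seen:
--                 seen.add(node)
--                 root = uf.find(node)
--                 clusters.setdefault(root, []).append(node)
--
--     # Re-key clusters by canonical (highest mention_count, then alphabetical)
--     result: dict[str, list[str]] = {}
--     for members in clusters.values():
--         canonical = min(
--             members,
--             key=lambda m: (-counts.get(m, 0), m),
--         )
--         result[canonical] = sorted(members)
--
--     return result
-- ===== SOURCE B (Python) =====
-- def compute_transitive_closure(edges, mention_counts=None):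
--     """Connected-component clustering by label propagation: each node carries a
--     component label; an edge merges the two labels by relabelling one side."""
--     if not edges:
--         return {}
--     counts = mention_counts or {}
--
--     label = {}  # node -> component label, keys in first-seen order
--     for a, b in edges:
--         la = label.setdefault(a, a)
--         lb = label.setdefault(b, b)
--         if la != lb:
--             for n, l in label.items():
--                 if l == lb:
--                     label[n] = la
--
--     clusters = {}  # label -> members, in first-seen-component order
--     for node, l in label.items():
--         clusters.setdefault(l, []).append(node)
--
--     result = {}
--     for members in clusters.values():
--         canonical = min(members, key=lambda m: (-counts.get(m, 0), m))
--         result[canonical] = sorted(members)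
--     return result
-- ===== Notes on version B (the rewrite author's own statement) =====
-- stated objective: alternative
-- what changed: Replaces the union-find (parent/rank forest with path halving) by flat label propagation: each node carries a component label and each edge relabels one whole label class, components then read straight off the label map.
import Mathlib
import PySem

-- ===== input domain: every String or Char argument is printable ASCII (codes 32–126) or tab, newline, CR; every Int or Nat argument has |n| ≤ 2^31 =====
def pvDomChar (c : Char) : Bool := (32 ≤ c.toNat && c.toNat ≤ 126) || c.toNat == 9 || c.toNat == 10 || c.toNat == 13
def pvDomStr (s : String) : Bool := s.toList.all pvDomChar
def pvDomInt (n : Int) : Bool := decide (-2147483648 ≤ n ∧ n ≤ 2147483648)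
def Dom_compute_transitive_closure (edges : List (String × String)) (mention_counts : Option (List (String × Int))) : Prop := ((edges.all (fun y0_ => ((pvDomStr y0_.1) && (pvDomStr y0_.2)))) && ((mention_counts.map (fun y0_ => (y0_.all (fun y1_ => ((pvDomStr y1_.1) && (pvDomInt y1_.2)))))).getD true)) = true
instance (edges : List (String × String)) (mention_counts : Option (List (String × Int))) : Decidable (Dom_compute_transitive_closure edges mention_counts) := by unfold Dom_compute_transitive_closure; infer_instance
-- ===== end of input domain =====

-- B replaces A's union-find (parent/rank forests with path halving) by direct label
-- propagation: every node carries a component label and an edge relabels one side;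
-- objective: alternative (simpler flat-dict state, no tree walking; not claimed faster).

-- ===== PORT A =====
-- shared final phase (identical source code in Source A and Source B): re-key each member
-- list by its canonical element (highest count, ties alphabetical) and sort it
def rekeyCanonical (counts : PySem.Dict String Int) (vals : List (List String)) : List (String × List String) :=
  (vals.foldl (fun res members =>
      let canonical := (PySem.List.min2? members (fun m => -(counts.getD m 0)) (fun m => m)).getD ""
      res.insert canonical (PySem.List.sorted members (fun m => m))) PySem.Dict.empty).items

-- the `while self._parent[x] != x` loop with path halving; fuel = dict size always
-- suffices (parent chains are acyclic and stay inside the key set)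
def ufFindLoop : Nat → PySem.Dict String String → String → String × PySem.Dict String String
  | 0, p, x => (x, p)
  | fuel+1, p, x =>
    let px := p.getD x x
    if px = x then (x, p)
    else
      let gpx := p.getD px px
      ufFindLoop fuel (p.insert x gpx) gpx

def ufFind (p : PySem.Dict String String) (r : PySem.Dict String Int) (x : String) :
    String × PySem.Dict String String × PySem.Dict String Int :=
  let pr := if p.contains x then (p, r) else (p.insert x x, r.insert x 0)
  let res := ufFindLoop pr.1.size pr.1 x
  (res.1, res.2, pr.2)

def ufUnion (p : PySem.Dict String String) (r : PySem.Dict String Int) (a b : String) :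
    PySem.Dict String String × PySem.Dict String Int :=
  let fa := ufFind p r a
  let fb := ufFind fa.2.1 fa.2.2 b
  let ra := fa.1
  let rb := fb.1
  let p1 := fb.2.1
  let r1 := fb.2.2
  if ra = rb then (p1, r1)
  else
    let rab := if r1.getD ra 0 < r1.getD rb 0 then (rb, ra) else (ra, rb)
    let p2 := p1.insert rab.2 rab.1
    let r2 := if r1.getD rab.1 0 = r1.getD rab.2 0 then r1.insert rab.1 (r1.getD rab.1 0 + 1) else r1
    (p2, r2)

-- body of `for node in (a, b): if node not in seen: …`
def ufVisit (st : PySem.Set String × PySem.Dict String (List String) × PySem.Dict String String × PySem.Dict String Int)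
    (node : String) :
    PySem.Set String × PySem.Dict String (List String) × PySem.Dict String String × PySem.Dict String Int :=
  if st.1.contains node then st
  else
    let seen := PySem.Set.add st.1 node
    let f := ufFind st.2.2.1 st.2.2.2 node
    let clusters := st.2.1.modify f.1 [] (· ++ [node])
    (seen, clusters, f.2.1, f.2.2)

-- one iteration of `for a, b in edges:` (self-edges call find, others union)
def ufProcessEdge (pr : PySem.Dict String String × PySem.Dict String Int) (ab : String × String) :
    PySem.Dict String String × PySem.Dict String Int :=
  if ab.1 = ab.2 then
    let f := ufFind pr.1 pr.2 ab.1
    (f.2.1, f.2.2)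
  else ufUnion pr.1 pr.2 ab.1 ab.2

def compute_transitive_closure (edges : List (String × String)) (mention_counts : Option (List (String × Int))) : List (String × List String) :=
  if edges = [] then []
  else
    let counts := PySem.Dict.ofList (mention_counts.getD [])
    let pr := edges.foldl ufProcessEdge (PySem.Dict.empty, PySem.Dict.empty)
    let st := edges.foldl (fun st ab => ufVisit (ufVisit st ab.1) ab.2)
      ((PySem.Set.empty : PySem.Set String), PySem.Dict.empty, pr.1, pr.2)
    rekeyCanonical counts st.2.1.values

-- ===== PORT B =====
def lpSetdefault (d : PySem.Dict String String) (k : String) : String × PySem.Dict String String :=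
  match d.get? k with
  | some v => (v, d)
  | none => (k, d.insert k k)

-- `for n, l in label.items(): if l == lb: label[n] = la`
def lpRelabel (label : PySem.Dict String String) (la lb : String) : PySem.Dict String String :=
  label.items.foldl (fun d nl => if nl.2 = lb then d.insert nl.1 la else d) label

-- one iteration of B's `for a, b in edges:`
def lpProcessEdge (label : PySem.Dict String String) (ab : String × String) : PySem.Dict String String :=
  let s1 := lpSetdefault label ab.1
  let s2 := lpSetdefault s1.2 ab.2
  if s1.1 = s2.1 then s2.2 else lpRelabel s2.2 s1.1 s2.1

def compute_transitive_closure_alt (edges : List (String × String)) (mention_counts : Option (List (String × Int))) : List (String × List String) :=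
  if edges = [] then []
  else
    let counts := PySem.Dict.ofList (mention_counts.getD [])
    let label := edges.foldl lpProcessEdge PySem.Dict.empty
    let clusters := label.items.foldl (fun c nl => c.modify nl.2 [] (· ++ [nl.1])) PySem.Dict.empty
    rekeyCanonical counts clusters.values

-- ===== PRECONDITION & SPEC =====
def Spec_compute_transitive_closure (edges : List (String × String)) (mention_counts : Option (List (String × Int))) (out : List (String × List String)) : Prop := out = compute_transitive_closure_alt edges mention_counts
instance (edges : List (String × String)) (mention_counts : Option (List (String × Int))) (out : List (String × List String)) : Decidable (Spec_compute_transitive_closure edges mention_counts out) := by unfold Spec_compute_transitive_closure; infer_instance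

-- ===== CLAIM (what is proved, stated in full; the proofs are below) =====
def Claim_equal_compute_transitive_closure : Prop := ∀ (edges : List (String × String)) (mention_counts : Option (List (String × Int))), Dom_compute_transitive_closure edges mention_counts → Spec_compute_transitive_closure edges mention_counts (compute_transitive_closure edges mention_counts)

-- ===== LEMMAS AND PROOFS =====

-- ---- abstraction of the parent map as a step function with well-founded chains ----
def fstep (p : PySem.Dict String String) (y : String) : String := p.getD y y

def FInv (g : String → String) : Prop := ∃ d : String → Nat, ∀ y, g y = y ∨ d (g y) < d y

def UFInv (p : PySem.Dict String String) : Prop :=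
  p.keys.Nodup ∧ (∀ y ∈ p.keys, fstep p y ∈ p.keys) ∧ FInv (fstep p)

noncomputable def chainN (g : String → String) (x : String) : Nat :=
  @dite Nat (∃ n, g (g^[n] x) = g^[n] x) (Classical.dec _) (fun h => Nat.find h) (fun _ => 0)

noncomputable def rootg (g : String → String) (x : String) : String := g^[chainN g x] x

-- ---- connectivity of the edge list ----
def erel (E : List (String × String)) (x y : String) : Prop := (x, y) ∈ E ∨ (y, x) ∈ E
def conn (E : List (String × String)) (x y : String) : Prop := Relation.EqvGen (erel E) x y
def enodes (E : List (String × String)) : List String := E.flatMap (fun ab => [ab.1, ab.2])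

-- ---- grouping a node list by a key function ----
def groupDict (k : String → String) (ns : List String) : PySem.Dict String (List String) :=
  ns.foldl (fun c n => c.modify (k n) [] (· ++ [n])) PySem.Dict.empty

def repsBy (k : String → String) (ns : List String) : List String :=
  ns.foldl (fun acc n => if acc.any (fun m => k m == k n) then acc else acc ++ [n]) []

def groupVals (k : String → String) (ns : List String) : List (List String) :=
  (repsBy k ns).map (fun rep => ns.filter (fun n => k n == k rep))

-- ---- chain/root basics ----
lemma finv_exists_fix {g : String → String} (hg : FInv g) (x : String) :
    ∃ n, g (g^[n] x) = g^[n] x := by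
  obtain ⟨d, hd⟩ := hg
  induction hn : d x using Nat.strong_induction_on generalizing x with
  | _ n ih =>
    by_cases hfix : g x = x
    · exact ⟨0, by simpa using hfix⟩
    · obtain ⟨m, hm⟩ := ih (d (g x)) (hn ▸ (hd x).resolve_left hfix) (g x) rfl
      exact ⟨m + 1, by simpa [Function.iterate_succ_apply] using hm⟩

lemma chainN_spec {g : String → String} (hg : FInv g) (x : String) :
    g (g^[chainN g x] x) = g^[chainN g x] x := by
  unfold chainN
  rw [dif_pos (finv_exists_fix hg x)]
  exact Nat.find_spec (finv_exists_fix hg x)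

lemma chainN_fix {g : String → String} {x : String} (h : g x = x) : chainN g x = 0 := by
  unfold chainN
  split
  · next he => exact Nat.find_eq_zero he |>.mpr (by simpa using h)
  · rfl

lemma rootg_of_fix {g : String → String} {x : String} (h : g x = x) : rootg g x = x := by
  unfold rootg
  rw [chainN_fix h]
  rfl

lemma chainN_step {g : String → String} (hg : FInv g) {x : String} (h : g x ≠ x) :
    chainN g x = chainN g (g x) + 1 := by
  have he := finv_exists_fix hg x
  have he' := finv_exists_fix hg (g x)
  unfold chainN
  rw [dif_pos he, dif_pos he']
  rw [Nat.find_eq_iff]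
  constructor
  · simpa [Function.iterate_succ_apply] using Nat.find_spec he'
  · intro m hm
    match m with
    | 0 => simpa using h
    | k + 1 =>
      have hk : k < Nat.find he' := by omega
      have := Nat.find_min he' hk
      simpa [Function.iterate_succ_apply] using this

lemma rootg_step {g : String → String} (hg : FInv g) {x : String} (h : g x ≠ x) :
    rootg g x = rootg g (g x) := by
  unfold rootg
  rw [chainN_step hg h, Function.iterate_succ_apply]

lemma rootg_fix {g : String → String} (hg : FInv g) (x : String) :
    g (rootg g x) = rootg g x := chainN_spec hg x

-- a step to g x either collapses (g x fixed) or continues; root after two steps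
lemma rootg_step2 {g : String → String} (hg : FInv g) {x : String} (h : g x ≠ x) :
    rootg g x = rootg g (g (g x)) := by
  rw [rootg_step hg h]
  by_cases h2 : g (g x) = g x
  · rw [h2]
  · rw [rootg_step hg h2]

lemma mem_keys_of_nonfix {p : PySem.Dict String String} {y : String} (h : fstep p y ≠ y) :
    y ∈ p.keys := by
  by_contra hy
  have hc : p.contains y = false := by
    rcases hcc : p.contains y with _ | _
    · rfl
    · exact absurd ((PySem.Dict.contains_iff_mem_keys p y).mp hcc) hy
  exact h (PySem.Dict.getD_of_not_contains p y hc)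

lemma rootg_mem_keys {p : PySem.Dict String String} (hUF : UFInv p) {x : String}
    (hx : x ∈ p.keys) : rootg (fstep p) x ∈ p.keys := by
  obtain ⟨hnd, hcl, hfi⟩ := hUF
  obtain ⟨d, hd⟩ := hfi
  induction hn : d x using Nat.strong_induction_on generalizing x with
  | _ n ih =>
    by_cases hfix : fstep p x = x
    · rw [rootg_of_fix hfix]; exact hx
    · rw [rootg_step ⟨d, hd⟩ hfix]
      exact ih (d (fstep p x)) (hn ▸ (hd x).resolve_left hfix) (hcl x hx) rfl

lemma size_eq_keys_length (p : PySem.Dict String String) : p.size = p.keys.length := by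
  cases p with
  | mk items => simp [PySem.Dict.size, PySem.Dict.keys]

lemma chainN_le_size {p : PySem.Dict String String} (hUF : UFInv p) (x : String) :
    chainN (fstep p) x ≤ p.size := by
  classical
  obtain ⟨hnd, hcl, d, hd⟩ := hUF
  have he := finv_exists_fix ⟨d, hd⟩ x
  unfold chainN
  rw [dif_pos he]
  set N := Nat.find he with hN
  have hmin : ∀ i, i < N → fstep p ((fstep p)^[i] x) ≠ (fstep p)^[i] x :=
    fun i hi => Nat.find_min he hi
  have hkeys : ∀ i, i < N → (fstep p)^[i] x ∈ p.keys :=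
    fun i hi => mem_keys_of_nonfix (hmin i hi)
  have hdec : ∀ i, i < N → d ((fstep p)^[i + 1] x) < d ((fstep p)^[i] x) := by
    intro i hi
    have := (hd ((fstep p)^[i] x)).resolve_left (hmin i hi)
    simpa [Function.iterate_succ_apply'] using this
  have hmono : ∀ j, j < N → ∀ i, i < j → d ((fstep p)^[j] x) < d ((fstep p)^[i] x) := by
    intro j
    induction j with
    | zero => omega
    | succ j ih =>
      intro hj i hij
      rcases Nat.lt_succ_iff_lt_or_eq.mp hij with h' | h'
      · exact (hdec j (by omega)).trans (ih (by omega) i h')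
      · subst h'
        exact hdec i (by omega)
  have hnodup : ((List.range N).map (fun i => (fstep p)^[i] x)).Nodup := by
    rw [List.nodup_map_iff_inj_on List.nodup_range]
    intro i hi j hj hgij
    simp only [List.mem_range] at hi hj
    by_contra hne
    rcases Nat.lt_or_ge i j with hlt | hge
    · exact absurd (hgij ▸ hmono j hj i hlt) (lt_irrefl _)
    · have hlt : j < i := by omega
      exact absurd (hgij ▸ hmono i hi j hlt) (lt_irrefl _)
  have hsub : ((List.range N).map (fun i => (fstep p)^[i] x)) ⊆ p.keys := by
    intro z hz
    simp only [List.mem_map, List.mem_range] at hz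
    obtain ⟨i, hi, rfl⟩ := hz
    exact hkeys i hi
  have hlen : ((List.range N).map (fun i => (fstep p)^[i] x)).length ≤ p.keys.length := by
    calc ((List.range N).map (fun i => (fstep p)^[i] x)).length
        = ((List.range N).map (fun i => (fstep p)^[i] x)).toFinset.card :=
          (List.toFinset_card_of_nodup hnodup).symm
      _ ≤ p.keys.toFinset.card := Finset.card_le_card (by
          intro z hz
          simp only [List.mem_toFinset] at *
          exact hsub hz)
      _ ≤ p.keys.length := p.keys.toFinset_card_le
  simpa [size_eq_keys_length] using hlen

-- ---- effect of the dict operations on fstep / roots ----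
lemma fstep_insert (p : PySem.Dict String String) (k v y : String) :
    fstep (p.insert k v) y = if y = k then v else fstep p y := by
  unfold fstep
  rw [PySem.Dict.getD_insert]

lemma fstep_insert_fresh {p : PySem.Dict String String} {x : String}
    (hc : p.contains x = false) : fstep (p.insert x x) = fstep p := by
  funext y
  rw [fstep_insert]
  split
  · next h => exact h ▸ (PySem.Dict.getD_of_not_contains p x hc).symm
  · rfl

lemma ufinv_insert_fresh {p : PySem.Dict String String} {x : String} (hUF : UFInv p)
    (hc : p.contains x = false) : UFInv (p.insert x x) := by
  obtain ⟨hnd, hcl, hfi⟩ := hUF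
  have hkeys := PySem.Dict.keys_insert_of_not_contains p x hc
  have hxnot : x ∉ p.keys := fun hx => by
    rw [(PySem.Dict.contains_iff_mem_keys p x).mpr hx] at hc
    exact absurd hc (by simp)
  refine ⟨?_, ?_, ?_⟩
  · rw [hkeys]
    rw [List.nodup_append]
    refine ⟨hnd, List.nodup_singleton x, ?_⟩
    intro a ha b hb
    rw [List.mem_singleton] at hb
    subst hb
    exact fun hab => hxnot (hab ▸ ha)
  · intro y hy
    rw [fstep_insert_fresh hc] at *
    rw [hkeys] at hy ⊢
    rcases List.mem_append.mp hy with hy | hy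
    · exact List.mem_append.mpr (Or.inl (hcl y hy))
    · simp only [List.mem_singleton] at hy
      subst hy
      have : fstep p y = y := PySem.Dict.getD_of_not_contains p y hc
      rw [this]
      simp
  · rw [fstep_insert_fresh hc]
    exact hfi

-- path halving: same keys, same roots, chains do not grow
lemma halving_spec {p : PySem.Dict String String} {x : String} (hUF : UFInv p)
    (hnf : fstep p x ≠ x) :
    UFInv (p.insert x (fstep p (fstep p x))) ∧
    (p.insert x (fstep p (fstep p x))).keys = p.keys ∧
    (∀ y, rootg (fstep (p.insert x (fstep p (fstep p x)))) y = rootg (fstep p) y) ∧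
    (∀ y, chainN (fstep (p.insert x (fstep p (fstep p x)))) y ≤ chainN (fstep p) y) := by
  obtain ⟨hnd, hcl, d, hd⟩ := hUF
  have hfi : FInv (fstep p) := ⟨d, hd⟩
  have hxk : x ∈ p.keys := mem_keys_of_nonfix hnf
  have hg' : ∀ y, fstep (p.insert x (fstep p (fstep p x))) y =
      if y = x then fstep p (fstep p x) else fstep p y :=
    fun y => fstep_insert p x (fstep p (fstep p x)) y
  have hdx : d (fstep p x) < d x := (hd x).resolve_left hnf
  have hdgg : d (fstep p (fstep p x)) < d x := by
    rcases hd (fstep p x) with h | h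
    · rw [h]; exact hdx
    · exact h.trans hdx
  have hfi' : FInv (fstep (p.insert x (fstep p (fstep p x)))) := by
    refine ⟨d, fun y => ?_⟩
    by_cases hyx : y = x
    · subst hyx
      rw [hg' y, if_pos rfl]
      exact Or.inr hdgg
    · rw [hg' y, if_neg hyx]
      exact hd y
  have hkeys : (p.insert x (fstep p (fstep p x))).keys = p.keys :=
    PySem.Dict.keys_insert_of_contains p _ ((PySem.Dict.contains_iff_mem_keys p x).mpr hxk)
  have hUF' : UFInv (p.insert x (fstep p (fstep p x))) := by
    refine ⟨hkeys ▸ hnd, ?_, hfi'⟩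
    intro y hy
    rw [hkeys] at hy ⊢
    by_cases hyx : y = x
    · subst hyx
      rw [hg' y, if_pos rfl]
      exact hcl _ (hcl _ hxk)
    · rw [hg' y, if_neg hyx]
      exact hcl y hy
  have hxx : fstep (p.insert x (fstep p (fstep p x))) x ≠ x := by
    rw [hg' x, if_pos rfl]
    intro hcon
    rw [hcon] at hdgg
    exact absurd hdgg (lt_irrefl _)
  have hroots : ∀ y, rootg (fstep (p.insert x (fstep p (fstep p x)))) y = rootg (fstep p) y := by
    intro y
    induction hn : d y using Nat.strong_induction_on generalizing y with
    | _ n ih =>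
      by_cases hfix : fstep p y = y
      · have hyx : y ≠ x := fun h => hnf (h ▸ hfix)
        have hfx' : fstep (p.insert x (fstep p (fstep p x))) y = y := by
          rw [hg' y, if_neg hyx]; exact hfix
        rw [rootg_of_fix hfx', rootg_of_fix hfix]
      · by_cases hyx : y = x
        · subst hyx
          rw [rootg_step hfi' hxx, hg' y, if_pos rfl,
            ih (d (fstep p (fstep p y))) (hn ▸ hdgg) _ rfl]
          exact (rootg_step2 hfi hfix).symm
        · have hne' : fstep (p.insert x (fstep p (fstep p x))) y ≠ y := by
            rw [hg' y, if_neg hyx]; exact hfix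
          rw [rootg_step hfi' hne', hg' y, if_neg hyx,
            ih (d (fstep p y)) (hn ▸ (hd y).resolve_left hfix) _ rfl,
            ← rootg_step hfi hfix]
  refine ⟨hUF', hkeys, hroots, ?_⟩
  intro y
  induction hn : d y using Nat.strong_induction_on generalizing y with
  | _ n ih =>
    by_cases hfix : fstep p y = y
    · have hyx : y ≠ x := fun h => hnf (h ▸ hfix)
      have hfx' : fstep (p.insert x (fstep p (fstep p x))) y = y := by
        rw [hg' y, if_neg hyx]; exact hfix
      rw [chainN_fix hfx', chainN_fix hfix]
    · by_cases hyx : y = x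
      · subst hyx
        rw [chainN_step hfi' hxx, chainN_step hfi hfix, hg' y, if_pos rfl]
        have h1 := ih (d (fstep p (fstep p y))) (hn ▸ hdgg) _ rfl
        by_cases h2 : fstep p (fstep p y) = fstep p y
        · rw [h2] at h1 ⊢
          omega
        · have h3 : chainN (fstep p) (fstep p y) = chainN (fstep p) (fstep p (fstep p y)) + 1 :=
            chainN_step hfi h2
          omega
      · have hne' : fstep (p.insert x (fstep p (fstep p x))) y ≠ y := by
          rw [hg' y, if_neg hyx]; exact hfix
        rw [chainN_step hfi' hne', chainN_step hfi hfix, hg' y, if_neg hyx]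
        have h1 := ih (d (fstep p y)) (hn ▸ (hd y).resolve_left hfix) _ rfl
        omega

-- linking one root under another
lemma link_spec {p : PySem.Dict String String} {ra rb : String} (hUF : UFInv p)
    (hra : fstep p ra = ra) (hrb : fstep p rb = rb) (hne : ra ≠ rb) (hrak : ra ∈ p.keys) :
    UFInv (p.insert rb ra) ∧
    (∀ y, y ∈ (p.insert rb ra).keys ↔ y ∈ p.keys ∨ y = rb) ∧
    (∀ y, rootg (fstep (p.insert rb ra)) y =
      if rootg (fstep p) y = rb then ra else rootg (fstep p) y) := by
  obtain ⟨hnd, hcl, d, hd⟩ := hUF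
  have hfi : FInv (fstep p) := ⟨d, hd⟩
  have hg' : ∀ y, fstep (p.insert rb ra) y = if y = rb then ra else fstep p y :=
    fun y => fstep_insert p rb ra y
  have hrra : rootg (fstep p) ra = ra := rootg_of_fix hra
  have hrrb : rootg (fstep p) rb = rb := rootg_of_fix hrb
  have hfi' : FInv (fstep (p.insert rb ra)) := by
    refine ⟨fun y => if rootg (fstep p) y = rb then d y + d ra + 1 else d y, fun y => ?_⟩
    beta_reduce
    by_cases hyb : y = rb
    · subst hyb
      rw [hg' y, if_pos rfl]
      refine Or.inr ?_
      rw [hrra, if_neg hne, hrrb, if_pos rfl]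
      omega
    · rw [hg' y, if_neg hyb]
      rcases hd y with hfix | hlt
      · exact Or.inl hfix
      · refine Or.inr ?_
        have hfix : fstep p y ≠ y := fun h => absurd (h ▸ hlt) (lt_irrefl _)
        have hr : rootg (fstep p) (fstep p y) = rootg (fstep p) y :=
          (rootg_step hfi hfix).symm
        rw [hr]
        split <;> omega
  have hmem : ∀ y, y ∈ (p.insert rb ra).keys ↔ y ∈ p.keys ∨ y = rb := by
    intro y
    rw [PySem.Dict.mem_keys_insert]
    tauto
  have hUF' : UFInv (p.insert rb ra) := by
    refine ⟨PySem.Dict.nodup_keys_insert p rb ra hnd, ?_, hfi'⟩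
    intro y hy
    by_cases hyb : y = rb
    · subst hyb
      rw [hg' y, if_pos rfl]
      exact (hmem ra).mpr (Or.inl hrak)
    · rw [hg' y, if_neg hyb]
      rcases (hmem y).mp hy with hy' | hy'
      · exact (hmem _).mpr (Or.inl (hcl y hy'))
      · exact absurd hy' hyb
  refine ⟨hUF', hmem, ?_⟩
  intro y
  induction hn : d y using Nat.strong_induction_on generalizing y with
  | _ n ih =>
    by_cases hfix : fstep p y = y
    · have hry : rootg (fstep p) y = y := rootg_of_fix hfix
      by_cases hyb : y = rb
      · rw [hry, if_pos hyb]
        have h1 : fstep (p.insert rb ra) y ≠ y := by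
          rw [hg' y, if_pos hyb]
          exact fun h => hne (h.trans hyb)
        rw [rootg_step hfi' h1, hg' y, if_pos hyb]
        apply rootg_of_fix
        rw [hg' ra, if_neg hne]
        exact hra
      · rw [hry, if_neg hyb]
        apply rootg_of_fix
        rw [hg' y, if_neg hyb]
        exact hfix
    · have hyb : y ≠ rb := fun h => hfix (h ▸ hrb)
      have h1 : fstep (p.insert rb ra) y ≠ y := by
        rw [hg' y, if_neg hyb]
        exact hfix
      rw [rootg_step hfi' h1, hg' y, if_neg hyb,
        ih (d (fstep p y)) (hn ▸ (hd y).resolve_left hfix) _ rfl,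
        ← rootg_step hfi hfix]

lemma findLoop_spec : ∀ (fuel : Nat) (p : PySem.Dict String String) (x : String),
    UFInv p → chainN (fstep p) x ≤ fuel →
    (ufFindLoop fuel p x).1 = rootg (fstep p) x ∧
    UFInv (ufFindLoop fuel p x).2 ∧
    (ufFindLoop fuel p x).2.keys = p.keys ∧
    (∀ y, rootg (fstep (ufFindLoop fuel p x).2) y = rootg (fstep p) y) := by
  intro fuel
  induction fuel with
  | zero =>
    intro p x hUF hch
    have h0 : chainN (fstep p) x = 0 := Nat.le_zero.mp hch
    have hrx : rootg (fstep p) x = x := by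
      unfold rootg
      rw [h0]
      rfl
    exact ⟨by simp [ufFindLoop, hrx], by simpa [ufFindLoop] using hUF,
      by simp [ufFindLoop], by simp [ufFindLoop]⟩
  | succ fuel ih =>
    intro p x hUF hch
    have hfi : FInv (fstep p) := hUF.2.2
    by_cases hfix : fstep p x = x
    · have hfix' : p.getD x x = x := hfix
      have hred : ufFindLoop (fuel + 1) p x = (x, p) := by
        simp [ufFindLoop, hfix']
      rw [hred]
      exact ⟨(rootg_of_fix hfix).symm, hUF, rfl, fun _ => rfl⟩
    · have hfix' : ¬ p.getD x x = x := hfix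
      have hred : ufFindLoop (fuel + 1) p x =
          ufFindLoop fuel (p.insert x (fstep p (fstep p x))) (fstep p (fstep p x)) := by
        simp [ufFindLoop, hfix']
        rfl
      obtain ⟨hUF1, hkeys1, hroots1, hchain1⟩ := halving_spec hUF hfix
      have hch1 : chainN (fstep (p.insert x (fstep p (fstep p x)))) (fstep p (fstep p x)) ≤ fuel := by
        have hstep : chainN (fstep p) x = chainN (fstep p) (fstep p x) + 1 := chainN_step hfi hfix
        have hb : chainN (fstep p) (fstep p (fstep p x)) ≤ chainN (fstep p) (fstep p x) := by
          by_cases h2 : fstep p (fstep p x) = fstep p x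
          · rw [h2]
          · rw [chainN_step hfi h2]
            omega
        have := hchain1 (fstep p (fstep p x))
        omega
      obtain ⟨ih1, ih2, ih3, ih4⟩ := ih (p.insert x (fstep p (fstep p x))) (fstep p (fstep p x)) hUF1 hch1
      rw [hred]
      refine ⟨?_, ih2, ih3.trans hkeys1, fun y => (ih4 y).trans (hroots1 y)⟩
      rw [ih1, hroots1]
      exact (rootg_step2 hfi hfix).symm

lemma find_spec {p : PySem.Dict String String} (r : PySem.Dict String Int) (x : String)
    (hUF : UFInv p) :
    (ufFind p r x).1 = rootg (fstep p) x ∧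
    UFInv (ufFind p r x).2.1 ∧
    (∀ y, y ∈ (ufFind p r x).2.1.keys ↔ y ∈ p.keys ∨ y = x) ∧
    (∀ y, rootg (fstep (ufFind p r x).2.1) y = rootg (fstep p) y) := by
  rcases hc : p.contains x with _ | _
  · have hEq : ufFind p r x =
        ((ufFindLoop (p.insert x x).size (p.insert x x) x).1,
         (ufFindLoop (p.insert x x).size (p.insert x x) x).2, r.insert x 0) := by
      simp [ufFind, hc]
    have hUF0 := ufinv_insert_fresh hUF hc
    have hg0 : fstep (p.insert x x) = fstep p := fstep_insert_fresh hc
    obtain ⟨h1, h2, h3, h4⟩ :=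
      findLoop_spec (p.insert x x).size (p.insert x x) x hUF0 (chainN_le_size hUF0 x)
    rw [hEq]
    refine ⟨by rw [h1, hg0], h2, ?_, fun y => by rw [h4 y, hg0]⟩
    intro y
    rw [h3, PySem.Dict.keys_insert_of_not_contains p x hc, List.mem_append,
      List.mem_singleton]
  · have hEq : ufFind p r x = ((ufFindLoop p.size p x).1, (ufFindLoop p.size p x).2, r) := by
      simp [ufFind, hc]
    obtain ⟨h1, h2, h3, h4⟩ := findLoop_spec p.size p x hUF (chainN_le_size hUF x)
    rw [hEq]
    refine ⟨h1, h2, ?_, h4⟩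
    intro y
    rw [h3]
    constructor
    · exact Or.inl
    · rintro (hy | rfl)
      · exact hy
      · exact (PySem.Dict.contains_iff_mem_keys p y).mp hc

lemma union_spec {p : PySem.Dict String String} (r : PySem.Dict String Int) (a b : String)
    (hUF : UFInv p) :
    UFInv (ufUnion p r a b).1 ∧
    (∀ y, y ∈ (ufUnion p r a b).1.keys ↔ y ∈ p.keys ∨ y = a ∨ y = b) ∧
    ∃ R, (R = rootg (fstep p) a ∨ R = rootg (fstep p) b) ∧
      (∀ y, rootg (fstep (ufUnion p r a b).1) y =
        if rootg (fstep p) y = rootg (fstep p) a ∨ rootg (fstep p) y = rootg (fstep p) b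
        then R else rootg (fstep p) y) := by
  obtain ⟨ha1, ha2, ha3, ha4⟩ := find_spec r a hUF
  obtain ⟨fa, hfa⟩ : ∃ t, ufFind p r a = t := ⟨_, rfl⟩
  rw [hfa] at ha1 ha2 ha3 ha4
  obtain ⟨hb1, hb2, hb3, hb4⟩ := find_spec fa.2.2 b ha2
  obtain ⟨fb, hfb⟩ : ∃ t, ufFind fa.2.1 fa.2.2 b = t := ⟨_, rfl⟩
  rw [hfb] at hb1 hb2 hb3 hb4
  have hra : fa.1 = rootg (fstep p) a := ha1
  have hrb : fb.1 = rootg (fstep p) b := by rw [hb1, ha4 b]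
  have roots3 : ∀ y, rootg (fstep fb.2.1) y = rootg (fstep p) y :=
    fun y => (hb4 y).trans (ha4 y)
  have keys3 : ∀ y, y ∈ fb.2.1.keys ↔ y ∈ p.keys ∨ y = a ∨ y = b := by
    intro y
    rw [hb3, ha3]
    tauto
  have hU1 : (ufUnion p r a b).1 = (if fa.1 = fb.1 then fb.2.1 else
      fb.2.1.insert
        (if fb.2.2.getD fa.1 0 < fb.2.2.getD fb.1 0 then (fb.1, fa.1) else (fa.1, fb.1)).2
        (if fb.2.2.getD fa.1 0 < fb.2.2.getD fb.1 0 then (fb.1, fa.1) else (fa.1, fb.1)).1) := by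
    unfold ufUnion
    simp only [hfa, hfb]
    by_cases h : fa.1 = fb.1 <;> simp [h]
  by_cases hrr : fa.1 = fb.1
  · rw [hU1, if_pos hrr]
    have hab : rootg (fstep p) a = rootg (fstep p) b := by rw [← hra, ← hrb, hrr]
    refine ⟨hb2, keys3, rootg (fstep p) a, Or.inl rfl, ?_⟩
    intro y
    rw [roots3 y]
    by_cases hcond : rootg (fstep p) y = rootg (fstep p) a ∨ rootg (fstep p) y = rootg (fstep p) b
    · rw [if_pos hcond]
      rcases hcond with h | h
      · exact h
      · rw [h, hab]
    · rw [if_neg hcond]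
  · have hfixa : fstep fb.2.1 (rootg (fstep p) a) = rootg (fstep p) a := by
      have := rootg_fix hb2.2.2 a
      rwa [roots3 a] at this
    have hfixb : fstep fb.2.1 (rootg (fstep p) b) = rootg (fstep p) b := by
      have := rootg_fix hb2.2.2 b
      rwa [roots3 b] at this
    have hne' : rootg (fstep p) a ≠ rootg (fstep p) b := by
      rw [← hra, ← hrb]
      exact hrr
    have hmema : rootg (fstep p) a ∈ fb.2.1.keys := by
      have := rootg_mem_keys hb2 ((keys3 a).mpr (Or.inr (Or.inl rfl)))
      rwa [roots3 a] at this
    have hmemb : rootg (fstep p) b ∈ fb.2.1.keys := by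
      have := rootg_mem_keys hb2 ((keys3 b).mpr (Or.inr (Or.inr rfl)))
      rwa [roots3 b] at this
    rw [hU1, if_neg hrr]
    by_cases hrank : fb.2.2.getD fa.1 0 < fb.2.2.getD fb.1 0
    · have hIns : (if fb.2.2.getD fa.1 0 < fb.2.2.getD fb.1 0 then (fb.1, fa.1)
          else (fa.1, fb.1)) = (fb.1, fa.1) := if_pos hrank
      obtain ⟨hL1, hL2, hL3⟩ := link_spec hb2 hfixb hfixa hne'.symm hmemb
      rw [hIns]
      simp only [hra, hrb]
      refine ⟨hL1, ?_, rootg (fstep p) b, Or.inr rfl, ?_⟩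
      · intro y
        rw [hL2 y, keys3 y]
        constructor
        · rintro ((hy | hy) | rfl)
          · exact Or.inl hy
          · exact Or.inr hy
          · rcases (keys3 (rootg (fstep p) a)).mp hmema with h | h
            · exact Or.inl h
            · exact Or.inr h
        · rintro (hy | hy)
          · exact Or.inl (Or.inl hy)
          · exact Or.inl (Or.inr hy)
      · intro y
        rw [hL3 y, roots3 y]
        by_cases h1 : rootg (fstep p) y = rootg (fstep p) a
        · rw [if_pos h1, if_pos (Or.inl h1)]
        · by_cases h2 : rootg (fstep p) y = rootg (fstep p) b
          · rw [if_neg h1, if_pos (Or.inr h2)]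
            exact h2
          · rw [if_neg h1, if_neg (by tauto)]
    · have hIns : (if fb.2.2.getD fa.1 0 < fb.2.2.getD fb.1 0 then (fb.1, fa.1)
          else (fa.1, fb.1)) = (fa.1, fb.1) := if_neg hrank
      obtain ⟨hL1, hL2, hL3⟩ := link_spec hb2 hfixa hfixb hne' hmema
      rw [hIns]
      simp only [hra, hrb]
      refine ⟨hL1, ?_, rootg (fstep p) a, Or.inl rfl, ?_⟩
      · intro y
        rw [hL2 y, keys3 y]
        constructor
        · rintro ((hy | hy) | rfl)
          · exact Or.inl hy
          · exact Or.inr hy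
          · rcases (keys3 (rootg (fstep p) b)).mp hmemb with h | h
            · exact Or.inl h
            · exact Or.inr h
        · rintro (hy | hy)
          · exact Or.inl (Or.inl hy)
          · exact Or.inl (Or.inr hy)
      · intro y
        rw [hL3 y, roots3 y]
        by_cases h2 : rootg (fstep p) y = rootg (fstep p) b
        · rw [if_pos h2, if_pos (Or.inr h2)]
        · by_cases h1 : rootg (fstep p) y = rootg (fstep p) a
          · rw [if_neg h2, if_pos (Or.inl h1)]
            exact h1
          · rw [if_neg h2, if_neg (by tauto)]


-- ---- connectivity lemmas ----
lemma conn_nil (x y : String) : conn [] x y ↔ x = y := by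
  constructor
  · intro h
    induction h with
    | rel _ _ hr => cases hr <;> simp_all
    | refl => rfl
    | symm _ _ _ ih => exact ih.symm
    | trans _ _ _ _ _ ih1 ih2 => exact ih1.trans ih2
  · rintro rfl
    exact Relation.EqvGen.refl x


lemma conn_trans {E : List (String × String)} {x y z : String} (h1 : conn E x y)
    (h2 : conn E y z) : conn E x z := Relation.EqvGen.trans x y z h1 h2

lemma conn_symm {E : List (String × String)} {x y : String} (h : conn E x y) :
    conn E y x := Relation.EqvGen.symm x y h

lemma conn_append (E : List (String × String)) (a b x y : String) :
    conn (E ++ [(a, b)]) x y ↔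
      conn E x y ∨ (conn E x a ∧ conn E b y) ∨ (conn E x b ∧ conn E a y) := by
  have hrel : ∀ u v, erel (E ++ [(a, b)]) u v ↔ erel E u v ∨ (u = a ∧ v = b) ∨ (u = b ∧ v = a) := by
    intro u v
    simp only [erel, List.mem_append, List.mem_singleton, Prod.mk.injEq]
    tauto
  constructor
  · intro h
    induction h with
    | rel u v hr =>
      rcases (hrel u v).mp hr with h' | ⟨rfl, rfl⟩ | ⟨rfl, rfl⟩
      · exact Or.inl (Relation.EqvGen.rel _ _ h')
      · exact Or.inr (Or.inl ⟨Relation.EqvGen.refl u, Relation.EqvGen.refl v⟩)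
      · exact Or.inr (Or.inr ⟨Relation.EqvGen.refl u, Relation.EqvGen.refl v⟩)
    | refl u => exact Or.inl (Relation.EqvGen.refl u)
    | symm u v _ ih =>
      rcases ih with h' | ⟨h1, h2⟩ | ⟨h1, h2⟩
      · exact Or.inl (conn_symm h')
      · exact Or.inr (Or.inr ⟨conn_symm h2, conn_symm h1⟩)
      · exact Or.inr (Or.inl ⟨conn_symm h2, conn_symm h1⟩)
    | trans u v w _ _ ih1 ih2 =>
      rcases ih1 with h1 | ⟨h1, h1'⟩ | ⟨h1, h1'⟩ <;>
        rcases ih2 with h2 | ⟨h2, h2'⟩ | ⟨h2, h2'⟩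
      · exact Or.inl (conn_trans h1 h2)
      · exact Or.inr (Or.inl ⟨conn_trans h1 h2, h2'⟩)
      · exact Or.inr (Or.inr ⟨conn_trans h1 h2, h2'⟩)
      · exact Or.inr (Or.inl ⟨h1, conn_trans h1' h2⟩)
      · exact Or.inl (conn_trans (conn_trans h1 (conn_symm (conn_trans h1' h2))) h2')
      · exact Or.inl (conn_trans h1 h2')
      · exact Or.inr (Or.inr ⟨h1, conn_trans h1' h2⟩)
      · exact Or.inl (conn_trans h1 h2')
      · exact Or.inl (conn_trans (conn_trans h1 (conn_symm (conn_trans h1' h2))) h2')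
  · have hmono : ∀ u v, conn E u v → conn (E ++ [(a, b)]) u v := by
      intro u v h
      exact Relation.EqvGen.mono (fun u' v' hr => (hrel u' v').mpr (Or.inl hr)) h
    have hab : conn (E ++ [(a, b)]) a b :=
      Relation.EqvGen.rel _ _ ((hrel a b).mpr (Or.inr (Or.inl ⟨rfl, rfl⟩)))
    rintro (h | ⟨h1, h2⟩ | ⟨h1, h2⟩)
    · exact hmono _ _ h
    · exact conn_trans (conn_trans (hmono _ _ h1) hab) (hmono _ _ h2)
    · exact conn_trans (conn_trans (hmono _ _ h1) (conn_symm hab)) (hmono _ _ h2)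

lemma mem_enodes_append (E : List (String × String)) (ab : String × String) (y : String) :
    y ∈ enodes (E ++ [ab]) ↔ y ∈ enodes E ∨ y = ab.1 ∨ y = ab.2 := by
  simp [enodes]

-- the one kernel-update lemma used for every edge-processing step of A and of B
lemma kernel_update {E : List (String × String)} {a b : String} {r1 r2 : String → String}
    {ra rb R : String} (hR : R = ra ∨ R = rb)
    (h2 : ∀ y, r2 y = if r1 y = ra ∨ r1 y = rb then R else r1 y)
    (hker : ∀ x y, r1 x = r1 y ↔ conn E x y) (hra : r1 a = ra) (hrb : r1 b = rb) :
    ∀ x y, r2 x = r2 y ↔ conn (E ++ [(a, b)]) x y := by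
  intro x y
  rw [conn_append, ← hker x y, ← hker x a, ← hker b y, ← hker x b, ← hker a y,
    hra, hrb, h2 x, h2 y]
  constructor
  · intro hEq
    by_cases hx : r1 x = ra ∨ r1 x = rb <;> by_cases hy : r1 y = ra ∨ r1 y = rb
    · rcases hx with hx | hx <;> rcases hy with hy | hy
      · exact Or.inl (hx.trans hy.symm)
      · exact Or.inr (Or.inl ⟨hx, hy.symm⟩)
      · exact Or.inr (Or.inr ⟨hx, hy.symm⟩)
      · exact Or.inl (hx.trans hy.symm)
    · rw [if_pos hx, if_neg hy] at hEq
      exact absurd (hEq ▸ hR) hy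
    · rw [if_neg hx, if_pos hy] at hEq
      exact absurd (hEq.symm ▸ hR) hx
    · rw [if_neg hx, if_neg hy] at hEq
      exact Or.inl hEq
  · intro hC
    rcases hC with hEq | ⟨hc1, hc2⟩ | ⟨hc1, hc2⟩
    · by_cases hx : r1 x = ra ∨ r1 x = rb
      · rw [if_pos hx, if_pos (by rw [← hEq]; exact hx)]
      · rw [if_neg hx, if_neg (by rw [← hEq]; exact hx), hEq]
    · rw [if_pos (Or.inl hc1), if_pos (Or.inr hc2.symm)]
    · rw [if_pos (Or.inr hc1), if_pos (Or.inl hc2.symm)]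


-- ---- phase 1 of A ----
def Inv1 (E : List (String × String)) (p : PySem.Dict String String) : Prop :=
  UFInv p ∧ (∀ y, y ∈ p.keys ↔ y ∈ enodes E) ∧
  (∀ x y, rootg (fstep p) x = rootg (fstep p) y ↔ conn E x y)

lemma processEdge_inv {E : List (String × String)}
    {pr : PySem.Dict String String × PySem.Dict String Int} {ab : String × String}
    (h : Inv1 E pr.1) : Inv1 (E ++ [ab]) (ufProcessEdge pr ab).1 := by
  obtain ⟨hUF, hkeys, hker⟩ := h
  by_cases hab : ab.1 = ab.2
  · have hEq1 : (ufProcessEdge pr ab).1 = (ufFind pr.1 pr.2 ab.1).2.1 := by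
      simp [ufProcessEdge, hab]
    obtain ⟨f1, f2, f3, f4⟩ := find_spec pr.2 ab.1 hUF
    rw [hEq1]
    refine ⟨f2, ?_, ?_⟩
    · intro y
      rw [f3 y, mem_enodes_append, hkeys y]
      constructor
      · rintro (hy | rfl)
        · exact Or.inl hy
        · exact Or.inr (Or.inl rfl)
      · rintro (hy | rfl | rfl)
        · exact Or.inl hy
        · exact Or.inr rfl
        · exact Or.inr hab.symm
    · have := kernel_update (E := E) (a := ab.1) (b := ab.2)
        (r1 := rootg (fstep pr.1)) (r2 := rootg (fstep (ufFind pr.1 pr.2 ab.1).2.1))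
        (ra := rootg (fstep pr.1) ab.1) (rb := rootg (fstep pr.1) ab.1)
        (R := rootg (fstep pr.1) ab.1) (Or.inl rfl) ?_ hker rfl (by rw [← hab]) 
      · exact this
      · intro y
        rw [f4 y]
        by_cases hc : rootg (fstep pr.1) y = rootg (fstep pr.1) ab.1
        · rw [if_pos (Or.inl hc), hc]
        · rw [if_neg (by tauto)]
  · have hEq1 : (ufProcessEdge pr ab).1 = (ufUnion pr.1 pr.2 ab.1 ab.2).1 := by
      simp [ufProcessEdge, hab]
    obtain ⟨u1, u2, R, hRor, hRif⟩ := union_spec pr.2 ab.1 ab.2 hUF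
    rw [hEq1]
    refine ⟨u1, ?_, ?_⟩
    · intro y
      rw [u2 y, mem_enodes_append, hkeys y]
    · exact kernel_update hRor hRif hker rfl rfl

lemma phase1_inv : ∀ (es : List (String × String)) (E : List (String × String))
    (pr : PySem.Dict String String × PySem.Dict String Int), Inv1 E pr.1 →
    Inv1 (E ++ es) (es.foldl ufProcessEdge pr).1 := by
  intro es
  induction es with
  | nil => intro E pr h; simpa using h
  | cons ab es ih =>
    intro E pr h
    have h1 := processEdge_inv (ab := ab) h
    have h2 := ih (E ++ [ab]) _ h1
    simpa [List.append_assoc] using h2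

-- ---- phase 2 of A ----
def Inv2 (E : List (String × String)) (root1 : String → String) (ns : List String)
    (st : PySem.Set String × PySem.Dict String (List String) ×
          PySem.Dict String String × PySem.Dict String Int) : Prop :=
  st.1 = ns ∧ st.2.1 = groupDict root1 ns ∧ UFInv st.2.2.1 ∧
  (∀ y, y ∈ st.2.2.1.keys ↔ y ∈ enodes E) ∧
  (∀ y, rootg (fstep st.2.2.1) y = root1 y)

lemma visit_inv {E : List (String × String)} {root1 : String → String} {ns : List String}
    {st : PySem.Set String × PySem.Dict String (List String) ×
          PySem.Dict String String × PySem.Dict String Int} {node : String}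
    (hnode : node ∈ enodes E) (h : Inv2 E root1 ns st) :
    Inv2 E root1 (PySem.Set.add ns node) (ufVisit st node) := by
  obtain ⟨hseen, hclus, hUF, hkeys, hroots⟩ := h
  rcases hc : st.1.contains node with _ | _
  · have hnotmem : node ∉ ns := by
      simp only [PySem.Set.contains, List.contains_eq_mem, decide_eq_false_iff_not] at hc
      rw [← hseen]
      exact hc
    have hEq : ufVisit st node = (PySem.Set.add st.1 node,
        st.2.1.modify (ufFind st.2.2.1 st.2.2.2 node).1 [] (· ++ [node]),
        (ufFind st.2.2.1 st.2.2.2 node).2.1, (ufFind st.2.2.1 st.2.2.2 node).2.2) := by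
      simp [ufVisit, hseen, hnotmem]
    obtain ⟨f1, f2, f3, f4⟩ := find_spec st.2.2.2 node hUF
    rw [hEq]
    refine ⟨by rw [hseen], ?_, f2, ?_, fun y => (f4 y).trans (hroots y)⟩
    · rw [hclus, f1, hroots node, PySem.Set.add_of_not_mem hnotmem]
      simp [groupDict, List.foldl_append]
    · intro y
      rw [f3 y, hkeys y]
      constructor
      · rintro (hy | rfl)
        · exact hy
        · exact hnode
      · exact Or.inl
  · have hmem : node ∈ ns := by
      simp only [PySem.Set.contains, List.contains_eq_mem, decide_eq_true_eq] at hc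
      rw [← hseen]
      exact hc
    have hEq : ufVisit st node = st := by
      simp [ufVisit, hseen, hmem]
    rw [hEq, PySem.Set.add_of_mem hmem]
    exact ⟨hseen, hclus, hUF, hkeys, hroots⟩

lemma phase2_fold {E : List (String × String)} {root1 : String → String} :
    ∀ (es : List (String × String)) (ns : List String)
      (st : PySem.Set String × PySem.Dict String (List String) ×
            PySem.Dict String String × PySem.Dict String Int),
    (∀ ab ∈ es, ab.1 ∈ enodes E ∧ ab.2 ∈ enodes E) → Inv2 E root1 ns st →
    Inv2 E root1 ((es.flatMap (fun ab => [ab.1, ab.2])).foldl PySem.Set.add ns)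
      (es.foldl (fun st ab => ufVisit (ufVisit st ab.1) ab.2) st) := by
  intro es
  induction es with
  | nil => intro ns st _ h; simpa using h
  | cons ab es ih =>
    intro ns st hsub h
    have h1 := visit_inv (hsub ab (by simp)).1 h
    have h2 := visit_inv (node := ab.2) (hsub ab (by simp)).2 h1
    have h3 := ih _ _ (fun e he => hsub e (by simp [he])) h2
    simpa [List.foldl_append] using h3

-- ---- B's label map ----
def InvB (E : List (String × String)) (d : PySem.Dict String String) : Prop :=
  d.keys = PySem.Set.ofList (enodes E) ∧ (∀ y ∈ d.keys, fstep d y ∈ d.keys) ∧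
  (∀ x y, fstep d x = fstep d y ↔ conn E x y)

lemma lpSetdefault_spec (d : PySem.Dict String String) (k : String) :
    (lpSetdefault d k).1 = fstep d k ∧ fstep (lpSetdefault d k).2 = fstep d ∧
    (lpSetdefault d k).2.keys = PySem.Set.add d.keys k ∧
    ((lpSetdefault d k).2.keys.Nodup ↔ d.keys.Nodup) := by
  rcases hg : d.get? k with _ | v
  · have hnm : k ∉ d.keys := (PySem.Dict.get?_eq_none_iff_not_mem_keys d k).mp hg
    have hc : d.contains k = false := by
      rcases hcc : d.contains k with _ | _
      · rfl
      · exact absurd ((PySem.Dict.contains_iff_mem_keys d k).mp hcc) hnm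
    have hEq : lpSetdefault d k = (k, d.insert k k) := by
      simp [lpSetdefault, hg]
    rw [hEq]
    have hkeys := PySem.Dict.keys_insert_of_not_contains d k hc
    refine ⟨(PySem.Dict.getD_of_not_contains d k hc).symm, fstep_insert_fresh hc, ?_, ?_⟩
    · rw [hkeys, PySem.Set.add_of_not_mem hnm]
    · rw [hkeys, List.nodup_append]
      constructor
      · rintro ⟨h1, _, _⟩
        exact h1
      · intro h1
        refine ⟨h1, List.nodup_singleton k, ?_⟩
        intro a ha b hb
        rw [List.mem_singleton] at hb
        subst hb
        exact fun hab => hnm (hab ▸ ha)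
  · have hm : k ∈ d.keys := by
      by_contra hnm
      rw [(PySem.Dict.get?_eq_none_iff_not_mem_keys d k).mpr hnm] at hg
      exact absurd hg (by simp)
    have hEq : lpSetdefault d k = (v, d) := by
      simp [lpSetdefault, hg]
    rw [hEq]
    refine ⟨?_, rfl, (PySem.Set.add_of_mem hm).symm, Iff.rfl⟩
    unfold fstep
    rw [PySem.Dict.getD_eq_get?_getD, hg]
    rfl

lemma relabel_fold_getD (la lb : String) :
    ∀ (items : List (String × String)) (d0 : PySem.Dict String String) (y c : String),
    (items.foldl (fun d nl => if nl.2 = lb then d.insert nl.1 la else d) d0).getD y c =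
      if (y, lb) ∈ items then la else d0.getD y c := by
  intro items
  induction items with
  | nil => intro d0 y c; simp
  | cons nl items ih =>
    intro d0 y c
    rw [List.foldl_cons, ih]
    by_cases hmem : (y, lb) ∈ items
    · rw [if_pos hmem, if_pos (List.mem_cons_of_mem nl hmem)]
    · rw [if_neg hmem]
      by_cases hn2 : nl.2 = lb
      · rw [if_pos hn2]
        by_cases hn1 : nl.1 = y
        · rw [PySem.Dict.getD_insert, if_pos hn1.symm,
            if_pos (by rw [List.mem_cons]; left; rw [← hn1, ← hn2])]
        · rw [PySem.Dict.getD_insert, if_neg (fun hy => hn1 hy.symm), if_neg ?_]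
          rw [List.mem_cons]
          rintro (hnl | hnl)
          · exact hn1 (congrArg Prod.fst hnl).symm
          · exact hmem hnl
      · rw [if_neg hn2, if_neg ?_]
        rw [List.mem_cons]
        rintro (hnl | hnl)
        · exact hn2 (congrArg Prod.snd hnl).symm
        · exact hmem hnl

lemma relabel_fold_keys (la lb : String) :
    ∀ (items : List (String × String)) (d0 : PySem.Dict String String),
    (∀ nl ∈ items, nl.1 ∈ d0.keys) →
    (items.foldl (fun d nl => if nl.2 = lb then d.insert nl.1 la else d) d0).keys = d0.keys := by
  intro items
  induction items with
  | nil => intro d0 _; rfl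
  | cons nl items ih =>
    intro d0 hsub
    rw [List.foldl_cons]
    by_cases hn2 : nl.2 = lb
    · rw [if_pos hn2]
      have hk := PySem.Dict.keys_insert_of_contains d0 la
        ((PySem.Dict.contains_iff_mem_keys d0 nl.1).mpr (hsub nl (List.mem_cons_self)))
      rw [ih _ (fun nl' hnl' => by rw [hk]; exact hsub nl' (List.mem_cons_of_mem nl hnl')), hk]
    · rw [if_neg hn2]
      exact ih _ (fun nl' hnl' => hsub nl' (List.mem_cons_of_mem nl hnl'))

lemma lpRelabel_spec {d : PySem.Dict String String} {la lb : String}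
    (hnd : d.keys.Nodup) (hlb : lb ∈ d.keys) :
    (∀ y, fstep (lpRelabel d la lb) y = if fstep d y = lb then la else fstep d y) ∧
    (lpRelabel d la lb).keys = d.keys := by
  have hkeys : (lpRelabel d la lb).keys = d.keys :=
    relabel_fold_keys la lb d.items d (fun nl hnl => PySem.Dict.mem_keys_of_mem_items d hnl)
  refine ⟨?_, hkeys⟩
  intro y
  have hmem_iff : (y, lb) ∈ d.items ↔ fstep d y = lb := by
    constructor
    · intro hm
      exact PySem.Dict.getD_of_mem_items d hm hnd y
    · intro hf
      by_cases hy : y ∈ d.keys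
      · have hsome : d.get? y = some lb := by
          rcases hgy : d.get? y with _ | v
          · exact absurd ((PySem.Dict.get?_eq_none_iff_not_mem_keys d y).mp hgy)
              (fun h => h hy)
          · have hv : fstep d y = v := by
              unfold fstep
              rw [PySem.Dict.getD_eq_get?_getD, hgy]
              rfl
            exact congrArg some (hv.symm.trans hf)
        exact PySem.Dict.mem_items_of_get?_eq_some d hsome
      · have : fstep d y = y := by
          unfold fstep
          rw [PySem.Dict.getD_eq_get?_getD,
            (PySem.Dict.get?_eq_none_iff_not_mem_keys d y).mpr hy]
          rfl
        rw [this] at hf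
        exact absurd (hf ▸ hlb) hy
  have hL : fstep (lpRelabel d la lb) y = if (y, lb) ∈ d.items then la else fstep d y := by
    unfold lpRelabel fstep
    exact relabel_fold_getD la lb d.items d y y
  rw [hL]
  by_cases hm : (y, lb) ∈ d.items
  · rw [if_pos hm, if_pos (hmem_iff.mp hm)]
  · rw [if_neg hm, if_neg (fun hf => hm (hmem_iff.mpr hf))]

lemma lpProcess_inv {E : List (String × String)} {d : PySem.Dict String String}
    {ab : String × String} (h : InvB E d) : InvB (E ++ [ab]) (lpProcessEdge d ab) := by
  obtain ⟨hkeys, hcl, hker⟩ := h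
  have hnd : d.keys.Nodup := by
    rw [hkeys]
    exact PySem.Set.nodup_ofList _
  obtain ⟨hs1a, hs1b, hs1c, hs1d⟩ := lpSetdefault_spec d ab.1
  obtain ⟨hs2a, hs2b, hs2c, hs2d⟩ := lpSetdefault_spec (lpSetdefault d ab.1).2 ab.2
  have hg2 : fstep (lpSetdefault (lpSetdefault d ab.1).2 ab.2).2 = fstep d := by
    rw [hs2b, hs1b]
  have hk2 : (lpSetdefault (lpSetdefault d ab.1).2 ab.2).2.keys =
      PySem.Set.ofList (enodes (E ++ [ab])) := by
    rw [hs2c, hs1c, hkeys]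
    have : enodes (E ++ [ab]) = enodes E ++ [ab.1, ab.2] := by simp [enodes]
    rw [this, PySem.Set.ofList_eq_foldl (enodes E), PySem.Set.ofList_eq_foldl
      (enodes E ++ [ab.1, ab.2]), List.foldl_append]
    rfl
  have hnd2 : (lpSetdefault (lpSetdefault d ab.1).2 ab.2).2.keys.Nodup := by
    rw [hk2]
    exact PySem.Set.nodup_ofList _
  have hcl2 : ∀ y ∈ (lpSetdefault (lpSetdefault d ab.1).2 ab.2).2.keys,
      fstep (lpSetdefault (lpSetdefault d ab.1).2 ab.2).2 y ∈
        (lpSetdefault (lpSetdefault d ab.1).2 ab.2).2.keys := by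
    intro y hy
    rw [hg2]
    rw [hk2, PySem.Set.mem_ofList] at hy ⊢
    have hsup : ∀ z, z ∈ enodes E → z ∈ enodes (E ++ [ab]) := by
      intro z hz
      rw [mem_enodes_append]
      exact Or.inl hz
    by_cases hyk : y ∈ d.keys
    · exact hsup _ ((PySem.Set.mem_ofList _ _).mp (hkeys ▸ hcl y hyk))
    · have : fstep d y = y := by
        unfold fstep
        rw [PySem.Dict.getD_eq_get?_getD,
          (PySem.Dict.get?_eq_none_iff_not_mem_keys d y).mpr hyk]
        rfl
      rw [this]
      exact hy
  have hla : (lpSetdefault d ab.1).1 = fstep d ab.1 := hs1a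
  have hlb : (lpSetdefault (lpSetdefault d ab.1).2 ab.2).1 = fstep d ab.2 := by
    rw [hs2a, hs1b]
  have hmemab : ab.1 ∈ (lpSetdefault (lpSetdefault d ab.1).2 ab.2).2.keys ∧
      ab.2 ∈ (lpSetdefault (lpSetdefault d ab.1).2 ab.2).2.keys := by
    rw [hk2, PySem.Set.mem_ofList, PySem.Set.mem_ofList, mem_enodes_append, mem_enodes_append]
    exact ⟨Or.inr (Or.inl rfl), Or.inr (Or.inr rfl)⟩
  have hmla : fstep d ab.1 ∈ (lpSetdefault (lpSetdefault d ab.1).2 ab.2).2.keys := by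
    have := hcl2 ab.1 hmemab.1
    simpa [hg2] using this
  have hmlb : fstep d ab.2 ∈ (lpSetdefault (lpSetdefault d ab.1).2 ab.2).2.keys := by
    have := hcl2 ab.2 hmemab.2
    simpa [hg2] using this
  by_cases heq : (lpSetdefault d ab.1).1 = (lpSetdefault (lpSetdefault d ab.1).2 ab.2).1
  · have hEq : lpProcessEdge d ab = (lpSetdefault (lpSetdefault d ab.1).2 ab.2).2 := by
      simp [lpProcessEdge, heq]
    rw [hEq]
    refine ⟨hk2, hcl2, ?_⟩
    have hab : fstep d ab.1 = fstep d ab.2 := by rw [← hla, ← hlb, heq]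
    have hker2 := kernel_update (E := E) (a := ab.1) (b := ab.2)
      (r1 := fstep d) (r2 := fstep (lpSetdefault (lpSetdefault d ab.1).2 ab.2).2)
      (ra := fstep d ab.1) (rb := fstep d ab.2) (R := fstep d ab.1) (Or.inl rfl) ?_ hker rfl rfl
    · exact hker2
    · intro y
      rw [hg2]
      by_cases hc : fstep d y = fstep d ab.1 ∨ fstep d y = fstep d ab.2
      · rw [if_pos hc]
        rcases hc with hc | hc
        · exact hc
        · rw [hc, hab]
      · rw [if_neg hc]
  · have hEq : lpProcessEdge d ab = lpRelabel (lpSetdefault (lpSetdefault d ab.1).2 ab.2).2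
        (lpSetdefault d ab.1).1 (lpSetdefault (lpSetdefault d ab.1).2 ab.2).1 := by
      simp [lpProcessEdge, heq]
    obtain ⟨hr1, hr2⟩ := lpRelabel_spec hnd2 (hlb ▸ hmlb)
    rw [hEq]
    have hrf : ∀ y, fstep (lpRelabel (lpSetdefault (lpSetdefault d ab.1).2 ab.2).2
        (lpSetdefault d ab.1).1 (lpSetdefault (lpSetdefault d ab.1).2 ab.2).1) y =
        if fstep d y = fstep d ab.2 then fstep d ab.1 else fstep d y := by
      intro y
      rw [hr1 y, hg2, hla, hlb]
    refine ⟨hr2.trans hk2, ?_, ?_⟩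
    · intro y hy
      rw [hr2] at hy
      rw [hrf y, hr2]
      by_cases hc : fstep d y = fstep d ab.2
      · rw [if_pos hc]
        exact hmla
      · rw [if_neg hc]
        have := hcl2 y hy
        simpa [hg2] using this
    · have hne2 : fstep d ab.1 ≠ fstep d ab.2 := by
        rw [← hla, ← hlb]
        exact heq
      have hker2 := kernel_update (E := E) (a := ab.1) (b := ab.2)
        (r1 := fstep d) (r2 := fstep (lpRelabel (lpSetdefault (lpSetdefault d ab.1).2 ab.2).2
          (lpSetdefault d ab.1).1 (lpSetdefault (lpSetdefault d ab.1).2 ab.2).1))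
        (ra := fstep d ab.1) (rb := fstep d ab.2) (R := fstep d ab.1) (Or.inl rfl) ?_ hker rfl rfl
      · exact hker2
      · intro y
        rw [hrf y]
        by_cases hc1 : fstep d y = fstep d ab.2
        · rw [if_pos hc1, if_pos (Or.inr hc1)]
        · rw [if_neg hc1]
          by_cases hc2 : fstep d y = fstep d ab.1
          · rw [if_pos (Or.inl hc2)]
            exact hc2
          · rw [if_neg (by tauto)]

lemma phaseB_fold : ∀ (es E : List (String × String)) (d : PySem.Dict String String),
    InvB E d → InvB (E ++ es) (es.foldl lpProcessEdge d) := by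
  intro es
  induction es with
  | nil => intro E d h; simpa using h
  | cons ab es ih =>
    intro E d h
    have h1 := lpProcess_inv (ab := ab) h
    have h2 := ih (E ++ [ab]) _ h1
    simpa [List.append_assoc] using h2

-- ---- grouping values ----
lemma getD_irrel {d : PySem.Dict String String} {kk : String} (hk : kk ∈ d.keys)
    (c c' : String) : d.getD kk c = d.getD kk c' := by
  rcases hg : d.get? kk with _ | v
  · exact absurd ((PySem.Dict.get?_eq_none_iff_not_mem_keys d kk).mp hg) (fun h => h hk)
  · rw [PySem.Dict.getD_eq_get?_getD, PySem.Dict.getD_eq_get?_getD, hg]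
    rfl

lemma groupDict_keys (k : String → String) (ns : List String) :
    (groupDict k ns).keys = PySem.Set.ofList (ns.map k) := by
  unfold groupDict
  rw [PySem.Dict.keys_foldl_modify_key ns k [] (fun _ x => (· ++ [x])) PySem.Dict.empty,
    PySem.Dict.keys_empty, PySem.Set.update_nil_left]

lemma groupDict_nodup_keys (k : String → String) (ns : List String) :
    (groupDict k ns).keys.Nodup := by
  unfold groupDict
  exact PySem.Dict.nodup_keys_foldl_modify_key ns k [] (fun _ x => (· ++ [x]))
    PySem.Dict.empty (by rw [PySem.Dict.keys_empty]; exact List.nodup_nil)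

lemma groupDict_getD (k : String → String) (ns : List String) (c : String) :
    (groupDict k ns).getD c [] = ns.filter (fun n => k n == c) := by
  have h := PySem.Dict.getD_foldl_modify_append (ns.map (fun n => (k n, n)))
    PySem.Dict.empty c
  rw [List.foldl_map] at h
  unfold groupDict
  rw [h, PySem.Dict.getD_empty]
  have h1 : ((fun (x : String × String) => x.2) ∘ fun n => (k n, n)) = id := rfl
  have h2 : ((fun (p : String × String) => p.1 == c) ∘ fun n => (k n, n)) = fun n => k n == c := rfl
  rw [List.nil_append, List.filter_map, List.map_map, h1, h2, List.map_id]

lemma reps_aux (k : String → String) : ∀ (ns : List String) (racc : List String),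
    ns.foldl (fun acc n => PySem.Set.add acc (k n)) (racc.map k) =
      (ns.foldl (fun acc n => if acc.any (fun m => k m == k n) then acc else acc ++ [n]) racc).map k := by
  intro ns
  induction ns with
  | nil => intro racc; rfl
  | cons n ns ih =>
    intro racc
    rw [List.foldl_cons, List.foldl_cons]
    have hcond : k n ∈ racc.map k ↔ racc.any (fun m => k m == k n) = true := by
      constructor
      · intro hm
        obtain ⟨m, hmr, hkm⟩ := List.mem_map.mp hm
        exact List.any_eq_true.mpr ⟨m, hmr, beq_iff_eq.mpr hkm⟩
      · intro ha
        obtain ⟨m, hmr, hb⟩ := List.any_eq_true.mp ha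
        exact List.mem_map.mpr ⟨m, hmr, beq_iff_eq.mp hb⟩
    by_cases hmem : k n ∈ racc.map k
    · rw [PySem.Set.add_of_mem hmem, if_pos (hcond.mp hmem)]
      exact ih racc
    · rw [PySem.Set.add_of_not_mem hmem,
        if_neg (fun hc => hmem (hcond.mpr hc))]
      have : racc.map k ++ [k n] = (racc ++ [n]).map k := by simp
      rw [this]
      exact ih (racc ++ [n])

lemma ofList_map_reps (k : String → String) (ns : List String) :
    PySem.Set.ofList (ns.map k) = (repsBy k ns).map k := by
  rw [PySem.Set.ofList_eq_foldl, List.foldl_map]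
  have h := reps_aux k ns []
  simpa [repsBy] using h

lemma groupDict_values (k : String → String) (ns : List String) :
    (groupDict k ns).values = groupVals k ns := by
  rw [PySem.Dict.values_eq_map_keys (groupDict k ns) (groupDict_nodup_keys k ns) [],
    groupDict_keys, ofList_map_reps, List.map_map]
  unfold groupVals
  apply List.map_congr_left
  intro rep _
  simp only [Function.comp]
  exact groupDict_getD k ns (k rep)

lemma repsBy_congr {k1 k2 : String → String} (h : ∀ x y, k1 x = k1 y ↔ k2 x = k2 y)
    (ns : List String) : repsBy k1 ns = repsBy k2 ns := by
  unfold repsBy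
  have : ∀ (ns' : List String) (acc : List String),
      ns'.foldl (fun acc n => if acc.any (fun m => k1 m == k1 n) then acc else acc ++ [n]) acc =
      ns'.foldl (fun acc n => if acc.any (fun m => k2 m == k2 n) then acc else acc ++ [n]) acc := by
    intro ns'
    induction ns' with
    | nil => intro acc; rfl
    | cons n ns' ih =>
      intro acc
      rw [List.foldl_cons, List.foldl_cons]
      have hbeq : ∀ m, (k1 m == k1 n) = (k2 m == k2 n) := by
        intro m
        by_cases hm : k1 m = k1 n
        · simp [hm, (h m n).mp hm]
        · have hn2 : ¬ k2 m = k2 n := fun hc => hm ((h m n).mpr hc)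
          simp [hm, hn2]
      have hany : (acc.any (fun m => k1 m == k1 n)) = (acc.any (fun m => k2 m == k2 n)) :=
        PySem.List.any_congr_mem (fun m _ => hbeq m)
      rw [hany]
      by_cases hc : acc.any (fun m => k2 m == k2 n) = true
      · rw [if_pos hc]
        exact ih acc
      · rw [if_neg hc]
        exact ih (acc ++ [n])
  exact this ns []

lemma groupVals_congr {k1 k2 : String → String} (h : ∀ x y, k1 x = k1 y ↔ k2 x = k2 y)
    (ns : List String) : groupVals k1 ns = groupVals k2 ns := by
  unfold groupVals
  rw [repsBy_congr h ns]
  apply List.map_congr_left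
  intro rep _
  apply List.filter_congr
  intro n _
  by_cases hn : k1 n = k1 rep
  · simp [hn, (h n rep).mp hn]
  · have hn2 : ¬ k2 n = k2 rep := fun hc => hn ((h n rep).mpr hc)
    simp [hn, hn2]

lemma b_clusters_eq (d : PySem.Dict String String) (hnd : d.keys.Nodup) :
    d.items.foldl (fun c nl => c.modify nl.2 [] (· ++ [nl.1])) PySem.Dict.empty =
      groupDict (fstep d) d.keys := by
  rw [PySem.Dict.items_eq_map_keys d hnd "", List.foldl_map]
  unfold groupDict
  apply PySem.List.foldl_congr_mem
  intro acc kk hkk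
  have : d.getD kk "" = d.getD kk kk := getD_irrel hkk "" kk
  rw [this]
  rfl

-- ===== VERDICT (by name: the statement is the Claim_ definition above) =====
theorem compute_transitive_closure_spec : Claim_equal_compute_transitive_closure := by
  intro edges mc _
  unfold Spec_compute_transitive_closure
  by_cases h : edges = []
  · simp [compute_transitive_closure, compute_transitive_closure_alt, h]
  · -- shared base facts
    have hfsempty : ∀ y, fstep (PySem.Dict.empty : PySem.Dict String String) y = y := by
      intro y
      unfold fstep
      rw [PySem.Dict.getD_empty]
    have hUFempty : UFInv (PySem.Dict.empty : PySem.Dict String String) := by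
      refine ⟨?_, ?_, ⟨fun _ => 0, fun y => Or.inl (hfsempty y)⟩⟩
      · rw [PySem.Dict.keys_empty]
        exact List.nodup_nil
      · intro y hy
        rw [PySem.Dict.keys_empty] at hy
        exact absurd hy (List.not_mem_nil)
    have hkerempty : ∀ x y : String,
        fstep (PySem.Dict.empty : PySem.Dict String String) x = fstep PySem.Dict.empty y ↔
          conn [] x y := by
      intro x y
      rw [hfsempty x, hfsempty y, conn_nil]
    -- phase 1 of A
    have hbase1 : Inv1 [] ((PySem.Dict.empty : PySem.Dict String String),
        (PySem.Dict.empty : PySem.Dict String Int)).1 := by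
      refine ⟨hUFempty, ?_, ?_⟩
      · intro y
        rw [PySem.Dict.keys_empty]
        rfl
      · intro x y
        rw [rootg_of_fix (hfsempty x), rootg_of_fix (hfsempty y), conn_nil]
    have hInv1 : Inv1 edges (edges.foldl ufProcessEdge
        (PySem.Dict.empty, PySem.Dict.empty)).1 := by
      have := phase1_inv edges [] (PySem.Dict.empty, PySem.Dict.empty) hbase1
      simpa using this
    obtain ⟨hUF1, hkeys1, hker1⟩ := hInv1
    -- phase 2 of A
    have hbase2 : Inv2 edges (rootg (fstep (edges.foldl ufProcessEdge
        (PySem.Dict.empty, PySem.Dict.empty)).1)) []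
        ((PySem.Set.empty : PySem.Set String), PySem.Dict.empty,
         (edges.foldl ufProcessEdge (PySem.Dict.empty, PySem.Dict.empty)).1,
         (edges.foldl ufProcessEdge (PySem.Dict.empty, PySem.Dict.empty)).2) :=
      ⟨rfl, rfl, hUF1, hkeys1, fun _ => rfl⟩
    have hsub : ∀ ab ∈ edges, ab.1 ∈ enodes edges ∧ ab.2 ∈ enodes edges := by
      intro ab hab
      refine ⟨?_, ?_⟩ <;> simp only [enodes, List.mem_flatMap] <;>
        exact ⟨ab, hab, by simp⟩
    have hfold2 := phase2_fold edges [] _ hsub hbase2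
    have hclusA : (edges.foldl (fun st ab => ufVisit (ufVisit st ab.1) ab.2)
        ((PySem.Set.empty : PySem.Set String), PySem.Dict.empty,
         (edges.foldl ufProcessEdge (PySem.Dict.empty, PySem.Dict.empty)).1,
         (edges.foldl ufProcessEdge (PySem.Dict.empty, PySem.Dict.empty)).2)).2.1 =
        groupDict (rootg (fstep (edges.foldl ufProcessEdge
          (PySem.Dict.empty, PySem.Dict.empty)).1)) (PySem.Set.ofList (enodes edges)) := by
      have h1 := hfold2.2.1
      rw [PySem.Set.ofList_eq_foldl]
      exact h1
    -- B's label map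
    have hbaseB : InvB [] (PySem.Dict.empty : PySem.Dict String String) := by
      refine ⟨?_, ?_, hkerempty⟩
      · rw [PySem.Dict.keys_empty]
        rfl
      · intro y hy
        rw [PySem.Dict.keys_empty] at hy
        exact absurd hy (List.not_mem_nil)
    have hInvB : InvB edges (edges.foldl lpProcessEdge PySem.Dict.empty) := by
      have := phaseB_fold edges [] PySem.Dict.empty hbaseB
      simpa using this
    obtain ⟨hkeysB, hclB, hkerB⟩ := hInvB
    have hndB : (edges.foldl lpProcessEdge PySem.Dict.empty).keys.Nodup := by
      rw [hkeysB]
      exact PySem.Set.nodup_ofList _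
    have hclusB : ((edges.foldl lpProcessEdge PySem.Dict.empty).items.foldl
        (fun c nl => c.modify nl.2 [] (· ++ [nl.1])) PySem.Dict.empty) =
        groupDict (fstep (edges.foldl lpProcessEdge PySem.Dict.empty))
          (PySem.Set.ofList (enodes edges)) := by
      rw [b_clusters_eq _ hndB, hkeysB]
    -- kernels agree
    have hk12 : ∀ x y, rootg (fstep (edges.foldl ufProcessEdge
        (PySem.Dict.empty, PySem.Dict.empty)).1) x =
        rootg (fstep (edges.foldl ufProcessEdge (PySem.Dict.empty, PySem.Dict.empty)).1) y ↔
        fstep (edges.foldl lpProcessEdge PySem.Dict.empty) x =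
        fstep (edges.foldl lpProcessEdge PySem.Dict.empty) y :=
      fun x y => (hker1 x y).trans (hkerB x y).symm
    have hvals : (groupDict (rootg (fstep (edges.foldl ufProcessEdge
          (PySem.Dict.empty, PySem.Dict.empty)).1)) (PySem.Set.ofList (enodes edges))).values =
        (groupDict (fstep (edges.foldl lpProcessEdge PySem.Dict.empty))
          (PySem.Set.ofList (enodes edges))).values := by
      rw [groupDict_values, groupDict_values]
      exact groupVals_congr hk12 _
    -- assemble
    show compute_transitive_closure edges mc = compute_transitive_closure_alt edges mc
    simp only [compute_transitive_closure, compute_transitive_closure_alt, if_neg h]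
    rw [hclusA, hclusB, hvals]
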